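-- pv_equiv track=rewrite | github.com/Nghi-Dao/ema_verl | my_reward.py | extract_boxed_answer
-- ===== SOURCE A (Python) =====
-- def extract_boxed_answer(text):
--     # Find the last occurrence of \boxed{
--     start_idx = text.rfind("\\boxed{")
--     if start_idx == -1:
--         return None
--
--     content_start = start_idx + 7
--     brace_count = 1
--
--     # Count braces until we find the matching closing brace
--     for i in range(content_start, len(text)):
--         if text[i] == '{':
--             brace_count += 1
--         elif text[i] == '}':
--             brace_count -= 1
--
--         if brace_count == 0:
--             return text[content_start:i].strip()
--
--     return None
-- ===== SOURCE B (Python) =====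
-- def extract_boxed_answer(text):
--     # One pass over the whole text: record, for every opening brace, the index
--     # of its matching closing brace (a stray closer with an empty stack is
--     # ignored). Then a single table lookup for the brace of the last \boxed.
--     stack = []
--     match = {}
--     for i, c in enumerate(text):
--         if c == '{':
--             stack.append(i)
--         elif c == '}':
--             if stack:
--                 match[stack.pop()] = i
--     start_idx = text.rfind("\\boxed{")
--     if start_idx == -1:
--         return None
--     close = match.get(start_idx + 6)
--     if close is None:
--         return None
--     return text[start_idx + 7:close].strip()
-- ===== Notes on version B (the rewrite author's own statement) =====
-- stated objective: alternative
-- what changed: A scans forward from the last occurrence of \boxed keeping a brace counter; B instead makes one stack-based pass over the whole text building a table that maps each opening brace to its matching closing brace, then answers by a single table lookup at the brace of the last \boxed.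
import Mathlib
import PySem

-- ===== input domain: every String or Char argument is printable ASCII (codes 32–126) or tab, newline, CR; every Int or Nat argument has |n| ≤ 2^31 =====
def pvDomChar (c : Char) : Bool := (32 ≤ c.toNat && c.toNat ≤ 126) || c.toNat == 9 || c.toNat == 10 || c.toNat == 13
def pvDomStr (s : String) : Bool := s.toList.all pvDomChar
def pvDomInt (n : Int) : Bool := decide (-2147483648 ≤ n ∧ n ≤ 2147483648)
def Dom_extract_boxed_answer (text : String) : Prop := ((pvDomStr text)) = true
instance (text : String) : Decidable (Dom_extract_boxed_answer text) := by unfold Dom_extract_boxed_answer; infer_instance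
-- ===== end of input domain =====

-- B replaces A's counter scan after the last \boxed{ by one whole-text pass that
-- builds a brace-matching table plus a single lookup (alternative decomposition, same cost).

-- ===== PORT A =====
-- A's 'for i in range(content_start, len(text))' loop: rest = text[i:], i the running index, count the brace counter
def pvScanA (text : List Char) (cs : Int) : List Char → Int → Int → Option String
  | [], _, _ => none
  | c :: rest, i, count =>
    let count' := if c = '{' then count + 1 else if c = '}' then count - 1 else count
    if count' = 0 then
      some (String.ofList (PySem.Chars.strip (PySem.List.slice text (some cs) (some i))))
    else pvScanA text cs rest (i + 1) count'

def extract_boxed_answer (text : String) : Option String :=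
  let start_idx := PySem.Str.rfind text "\\boxed{"
  if start_idx = -1 then none
  else
    let content_start := start_idx + 7
    pvScanA text.toList content_start (text.toList.drop content_start.toNat) content_start 1

-- ===== PORT B =====
-- one step of B's scan: push the index of an opening brace, pop on a closing brace (ignoring a stray closer), record the match
def pvStepB (st : List Int × PySem.Dict Int Int) (ic : Int × Char) :
    List Int × PySem.Dict Int Int :=
  if ic.2 = '{' then (ic.1 :: st.1, st.2)
  else if ic.2 = '}' then
    match st.1 with
    | [] => (st.1, st.2)
    | p :: rest => (rest, st.2.insert p ic.1)
  else (st.1, st.2)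

def extract_boxed_answer_alt (text : String) : Option String :=
  let l := text.toList
  let st := (PySem.List.enumerate l 0).foldl pvStepB ([], PySem.Dict.empty)
  let start_idx := PySem.Str.rfind text "\\boxed{"
  if start_idx = -1 then none
  else
    match st.2.get? (start_idx + 6) with
    | none => none
    | some close =>
        some (String.ofList (PySem.Chars.strip (PySem.List.slice l (some (start_idx + 7)) (some close))))

-- ===== PRECONDITION & SPEC =====
def Spec_extract_boxed_answer (text : String) (out : Option String) : Prop := out = extract_boxed_answer_alt text
instance (text : String) (out : Option String) : Decidable (Spec_extract_boxed_answer text out) := by unfold Spec_extract_boxed_answer; infer_instance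

-- ===== CLAIM (what is proved, stated in full; the proofs are below) =====
def Claim_equal_extract_boxed_answer : Prop := ∀ (text : String), Dom_extract_boxed_answer text → Spec_extract_boxed_answer text (extract_boxed_answer text)

-- ===== LEMMAS AND PROOFS =====

-- abstract scan: offset (from the scan start) of the first index where the counter hits 0
def pvScan : List Char → Int → Option Nat
  | [], _ => none
  | c :: rest, count =>
    let count' := if c = '{' then count + 1 else if c = '}' then count - 1 else count
    if count' = 0 then some 0 else (pvScan rest count').map (· + 1)

theorem pvScanA_eq_pvScan (text : List Char) (cs : Int) :
    ∀ (s : List Char) (i count : Int),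
      pvScanA text cs s i count =
        (pvScan s count).map
          (fun k : Nat => String.ofList (PySem.Chars.strip (PySem.List.slice text (some cs) (some (i + (k : Int)))))) := by
  intro s
  induction s with
  | nil => intro i count; simp [pvScanA, pvScan]
  | cons c rest ih =>
    intro i count
    simp only [pvScanA, pvScan]
    by_cases h : (if c = '{' then count + 1 else if c = '}' then count - 1 else count) = 0
    · rw [if_pos h, if_pos h]; simp
    · rw [if_neg h, if_neg h, ih]
      cases hs : pvScan rest (if c = '{' then count + 1 else if c = '}' then count - 1 else count) with
      | none => simp
      | some k =>
        simp only [Option.map_some]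
        have heq : i + 1 + (k : Int) = i + ((k + 1 : Nat) : Int) := by push_cast; ring
        rw [heq]

theorem pvFold_preserve :
    ∀ (s : List Char) (i : Int) (stack0 : List Int) (m0 : PySem.Dict Int Int) (p : Int),
      p ∉ stack0 → p < i →
      ((PySem.List.enumerate s i).foldl pvStepB (stack0, m0)).2.get? p = m0.get? p := by
  intro s
  induction s with
  | nil => intro i stack0 m0 p _ _; simp [PySem.List.enumerate_nil]
  | cons c rest ih =>
    intro i stack0 m0 p hp hlt
    rw [PySem.List.enumerate_cons, List.foldl_cons]
    by_cases h1 : c = '{'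
    · have hst : pvStepB (stack0, m0) (i, c) = (i :: stack0, m0) := by simp [pvStepB, h1]
      rw [hst]
      refine ih (i + 1) (i :: stack0) m0 p ?_ (by omega)
      simp only [List.mem_cons, not_or]
      exact ⟨by omega, hp⟩
    · by_cases h2 : c = '}'
      · cases stack0 with
        | nil =>
          have hst : pvStepB (([] : List Int), m0) (i, c) = ([], m0) := by simp [pvStepB, h1, h2]
          rw [hst]
          exact ih (i + 1) [] m0 p (by simp) (by omega)
        | cons q rest0 =>
          have hst : pvStepB ((q :: rest0), m0) (i, c) = (rest0, m0.insert q i) := by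
            simp [pvStepB, h1, h2]
          rw [hst]
          have hpq : p ≠ q := by intro h; exact hp (h ▸ List.mem_cons_self)
          rw [ih (i + 1) rest0 (m0.insert q i) p
            (fun h => hp (List.mem_cons_of_mem _ h)) (by omega)]
          exact PySem.Dict.get?_insert_of_ne m0 i hpq
      · have hst : pvStepB (stack0, m0) (i, c) = (stack0, m0) := by simp [pvStepB, h1, h2]
        rw [hst]
        exact ih (i + 1) stack0 m0 p hp (by omega)

theorem pvFold_main :
    ∀ (s : List Char) (i : Int) (stack0 : List Int) (m0 : PySem.Dict Int Int) (d : Nat) (p : Int),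
      stack0.Nodup → (∀ x ∈ stack0, x < i) → stack0[d]? = some p →
      ((PySem.List.enumerate s i).foldl pvStepB (stack0, m0)).2.get? p =
        (match pvScan s ((d : Int) + 1) with
         | some k => some (i + (k : Int))
         | none => m0.get? p) := by
  intro s
  induction s with
  | nil =>
    intro i stack0 m0 d p _ _ _
    simp [PySem.List.enumerate_nil, pvScan]
  | cons c rest ih =>
    intro i stack0 m0 d p hnd hlt hd
    have hpmem : p ∈ stack0 := List.mem_of_getElem? hd
    rw [PySem.List.enumerate_cons, List.foldl_cons]
    by_cases h1 : c = '{'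
    · have hst : pvStepB (stack0, m0) (i, c) = (i :: stack0, m0) := by simp [pvStepB, h1]
      rw [hst]
      have hnd' : (i :: stack0).Nodup := by
        refine List.nodup_cons.mpr ⟨fun h => ?_, hnd⟩
        exact absurd (hlt i h) (by omega)
      have hbnd : ∀ x ∈ i :: stack0, x < i + 1 := by
        intro x hx
        rcases List.mem_cons.mp hx with h | h
        · omega
        · have := hlt x h; omega
      have hrec := ih (i + 1) (i :: stack0) m0 (d + 1) p hnd' hbnd
        (by simp only [List.getElem?_cons_succ]; exact hd)
      rw [hrec]
      have hcnt : (if c = '{' then ((d : Int) + 1) + 1 else if c = '}' then ((d : Int) + 1) - 1 else ((d : Int) + 1)) = (d : Int) + 2 := by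
        rw [if_pos h1]; ring
      simp only [pvScan, hcnt]
      rw [if_neg (by omega)]
      have : ((d : Int) + 2) = ((d + 1 : Nat) : Int) + 1 := by push_cast; ring
      rw [this]
      cases hs : pvScan rest (((d + 1 : Nat) : Int) + 1) with
      | none => simp
      | some k =>
        simp only [Option.map_some]
        have heq : i + 1 + (k : Int) = i + ((k + 1 : Nat) : Int) := by push_cast; ring
        rw [heq]
    · by_cases h2 : c = '}'
      · cases stack0 with
        | nil => simp at hd
        | cons q rest0 =>
          have hst : pvStepB ((q :: rest0), m0) (i, c) = (rest0, m0.insert q i) := by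
            simp [pvStepB, h1, h2]
          rw [hst]
          have hqn : q ∉ rest0 := (List.nodup_cons.mp hnd).1
          cases d with
          | zero =>
            have hpq : q = p := by simpa using hd
            subst hpq
            have hcnt : (if c = '{' then ((0 : Int) + 1) + 1 else if c = '}' then ((0 : Int) + 1) - 1 else ((0 : Int) + 1)) = 0 := by
              rw [if_neg h1, if_pos h2]; ring
            simp only [pvScan, Nat.cast_zero, hcnt]
            simp only [if_true]
            rw [pvFold_preserve rest (i + 1) rest0 (m0.insert q i) q hqn
              (by have := hlt q List.mem_cons_self; omega)]
            simp [PySem.Dict.get?_insert_self]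
          | succ d' =>
            have hd' : rest0[d']? = some p := by simpa using hd
            have hpq : p ≠ q := by
              intro h; exact hqn (h ▸ List.mem_of_getElem? hd')
            have hrec := ih (i + 1) rest0 (m0.insert q i) d' p (List.nodup_cons.mp hnd).2
              (by intro x hx; have := hlt x (List.mem_cons_of_mem _ hx); omega) hd'
            rw [hrec]
            have hcnt : (if c = '{' then (((d' + 1 : Nat) : Int) + 1) + 1 else if c = '}' then (((d' + 1 : Nat) : Int) + 1) - 1 else (((d' + 1 : Nat) : Int) + 1)) = (d' : Int) + 1 := by
              rw [if_neg h1, if_pos h2]; push_cast; ring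
            simp only [pvScan, hcnt]
            rw [if_neg (by omega)]
            cases hs : pvScan rest ((d' : Int) + 1) with
            | none => simp [PySem.Dict.get?_insert_of_ne m0 i hpq]
            | some k =>
            simp only [Option.map_some]
            have heq : i + 1 + (k : Int) = i + ((k + 1 : Nat) : Int) := by push_cast; ring
            rw [heq]
      · have hst : pvStepB (stack0, m0) (i, c) = (stack0, m0) := by simp [pvStepB, h1, h2]
        rw [hst]
        have hrec := ih (i + 1) stack0 m0 d p hnd
          (by intro x hx; have := hlt x hx; omega) hd
        rw [hrec]
        have hcnt : (if c = '{' then ((d : Int) + 1) + 1 else if c = '}' then ((d : Int) + 1) - 1 else ((d : Int) + 1)) = (d : Int) + 1 := by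
          rw [if_neg h1, if_neg h2]
        simp only [pvScan, hcnt]
        rw [if_neg (by omega)]
        cases hs : pvScan rest ((d : Int) + 1) with
        | none => simp
        | some k =>
          simp only [Option.map_some]
          have heq : i + 1 + (k : Int) = i + ((k + 1 : Nat) : Int) := by push_cast; ring
          rw [heq]

theorem pvFold_inv :
    ∀ (s : List Char) (i : Int) (stack0 : List Int) (m0 : PySem.Dict Int Int),
      stack0.Nodup → (∀ x ∈ stack0, x < i) →
      (∀ x ∈ stack0, m0.get? x = none) → (∀ k : Int, i ≤ k → m0.get? k = none) →
      (((PySem.List.enumerate s i).foldl pvStepB (stack0, m0)).1.Nodup ∧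
       (∀ x ∈ ((PySem.List.enumerate s i).foldl pvStepB (stack0, m0)).1, x < i + s.length) ∧
       (∀ x ∈ ((PySem.List.enumerate s i).foldl pvStepB (stack0, m0)).1,
          ((PySem.List.enumerate s i).foldl pvStepB (stack0, m0)).2.get? x = none) ∧
       (∀ k : Int, i + s.length ≤ k →
          ((PySem.List.enumerate s i).foldl pvStepB (stack0, m0)).2.get? k = none)) := by
  intro s
  induction s with
  | nil =>
    intro i stack0 m0 hnd hlt h3 h4
    simp only [PySem.List.enumerate_nil, List.foldl_nil, List.length_nil, Nat.cast_zero, add_zero]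
    exact ⟨hnd, fun x hx => hlt x hx, h3, h4⟩
  | cons c rest ih =>
    intro i stack0 m0 hnd hlt h3 h4
    rw [PySem.List.enumerate_cons, List.foldl_cons]
    have hlen : i + ((c :: rest).length : Int) = (i + 1) + (rest.length : Int) := by
      simp only [List.length_cons]; push_cast; ring
    rw [hlen]
    by_cases h1 : c = '{'
    · have hst : pvStepB (stack0, m0) (i, c) = (i :: stack0, m0) := by simp [pvStepB, h1]
      rw [hst]
      refine ih (i + 1) (i :: stack0) m0 ?_ ?_ ?_ ?_
      · exact List.nodup_cons.mpr ⟨fun h => absurd (hlt i h) (by omega), hnd⟩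
      · intro x hx
        rcases List.mem_cons.mp hx with h | h
        · omega
        · have := hlt x h; omega
      · intro x hx
        rcases List.mem_cons.mp hx with h | h
        · exact h ▸ h4 i le_rfl
        · exact h3 x h
      · intro k hk; exact h4 k (by omega)
    · by_cases h2 : c = '}'
      · cases stack0 with
        | nil =>
          have hst : pvStepB (([] : List Int), m0) (i, c) = ([], m0) := by simp [pvStepB, h1, h2]
          rw [hst]
          exact ih (i + 1) [] m0 (by simp) (by simp) (by simp) (fun k hk => h4 k (by omega))
        | cons q rest0 =>
          have hst : pvStepB ((q :: rest0), m0) (i, c) = (rest0, m0.insert q i) := by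
            simp [pvStepB, h1, h2]
          rw [hst]
          have hqn : q ∉ rest0 := (List.nodup_cons.mp hnd).1
          refine ih (i + 1) rest0 (m0.insert q i) (List.nodup_cons.mp hnd).2 ?_ ?_ ?_
          · intro x hx; have := hlt x (List.mem_cons_of_mem _ hx); omega
          · intro x hx
            rw [PySem.Dict.get?_insert_of_ne m0 i (fun h => hqn (by rwa [h] at hx))]
            exact h3 x (List.mem_cons_of_mem _ hx)
          · intro k hk
            have hq : q < i := hlt q List.mem_cons_self
            rw [PySem.Dict.get?_insert_of_ne m0 i (by omega)]
            exact h4 k (by omega)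
      · have hst : pvStepB (stack0, m0) (i, c) = (stack0, m0) := by simp [pvStepB, h1, h2]
        rw [hst]
        refine ih (i + 1) stack0 m0 hnd ?_ h3 (fun k hk => h4 k (by omega))
        intro x hx; have := hlt x hx; omega

theorem pvRfindGo_cases (s sub : List Char) :
    ∀ j : Nat, PySem.Chars.rfind.go s sub j = -1 ∨
      (0 ≤ PySem.Chars.rfind.go s sub j ∧
       sub.isPrefixOf (s.drop (PySem.Chars.rfind.go s sub j).toNat) = true) := by
  intro j
  induction j with
  | zero =>
    by_cases h : sub.isPrefixOf s
    · right; simp [PySem.Chars.rfind.go, h]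
    · left; simp [PySem.Chars.rfind.go, h]
  | succ j ih =>
    by_cases h : sub.isPrefixOf (s.drop (j + 1))
    · right
      simp only [PySem.Chars.rfind.go, h, if_pos]
      refine ⟨by positivity, ?_⟩
      simpa using h
    · simpa [PySem.Chars.rfind.go, h] using ih

theorem pvMain (text : String) : extract_boxed_answer text = extract_boxed_answer_alt text := by
  unfold extract_boxed_answer extract_boxed_answer_alt
  simp only [PySem.Str.rfind_eq]
  have hsubl : ("\\boxed{" : String).toList = ['\\', 'b', 'o', 'x', 'e', 'd', '{'] := by decide
  rw [hsubl]
  by_cases hneg : PySem.Chars.rfind text.toList ['\\', 'b', 'o', 'x', 'e', 'd', '{'] = -1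
  · rw [if_pos hneg, if_pos hneg]
  · rw [if_neg hneg, if_neg hneg]
    -- facts about the rfind result
    rcases pvRfindGo_cases text.toList ['\\', 'b', 'o', 'x', 'e', 'd', '{'] text.toList.length with h | hgo
    · exact absurd h hneg
    have hrfgo : PySem.Chars.rfind text.toList ['\\', 'b', 'o', 'x', 'e', 'd', '{'] =
        PySem.Chars.rfind.go text.toList ['\\', 'b', 'o', 'x', 'e', 'd', '{'] text.toList.length := rfl
    rw [← hrfgo] at hgo
    rcases hgo with ⟨hge, hpre⟩
    set l := text.toList with hldef
    set r := PySem.Chars.rfind l ['\\', 'b', 'o', 'x', 'e', 'd', '{'] with hrdef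
    set rn := r.toNat with hrndef
    have hrrn : r = (rn : Int) := (Int.toNat_of_nonneg hge).symm
    obtain ⟨t, ht⟩ := List.isPrefixOf_iff_prefix.mp hpre
    have hdlen : (l.drop rn).length = 7 + t.length := by
      rw [← ht]; simp; omega
    have hlen : rn + 7 ≤ l.length := by
      have := List.length_drop (l := l) (i := rn); omega
    have hp6 : l[rn + 6]? = some '{' := by
      have h1 : (l.drop rn)[6]? = some '{' := by
        rw [← ht]
        rw [List.getElem?_append_left (by simp)]
        rfl
      rw [List.getElem?_drop] at h1
      exact h1
    -- A side: (r + 7).toNat = rn + 7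
    have htn : (r + 7).toNat = rn + 7 := by omega
    rw [htn, pvScanA_eq_pvScan]
    -- B side: split the fold at position rn + 6
    have hdecomp : l = (l.take (rn + 6) ++ ['{']) ++ l.drop (rn + 7) := by
      have h1 : l.take (rn + 7) = l.take (rn + 6) ++ ['{'] := by
        rw [show rn + 7 = (rn + 6) + 1 from rfl, List.take_add_one, hp6]
        rfl
      rw [← h1, List.take_append_drop]
    have htk : (l.take (rn + 6)).length = rn + 6 := by
      rw [List.length_take]; omega
    -- the state after the prefix before position rn+6
    obtain ⟨hS1nd, hS1lt, _, hS1none⟩ :=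
      pvFold_inv (l.take (rn + 6)) 0 [] PySem.Dict.empty (by simp) (by simp)
        (by simp) (by intro k _; exact PySem.Dict.get?_empty k)
    set S1 := (PySem.List.enumerate (l.take (rn + 6)) 0).foldl pvStepB ([], PySem.Dict.empty) with hS1def
    rw [htk] at hS1lt hS1none
    have hS1lt' : ∀ x ∈ S1.1, x < ((rn : Int) + 6) := by
      intro x hx; have := hS1lt x hx; push_cast at this ⊢; omega
    have hS1none' : S1.2.get? ((rn : Int) + 6) = none := by
      have := hS1none ((rn : Int) + 6) (by push_cast; omega)
      exact this
    -- rewrite the big fold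
    have hfold : (PySem.List.enumerate l 0).foldl pvStepB ([], PySem.Dict.empty) =
        (PySem.List.enumerate (l.drop (rn + 7)) (((rn : Int) + 6) + 1)).foldl pvStepB
          ((((rn : Int) + 6) :: S1.1), S1.2) := by
      conv_lhs => rw [hdecomp]
      rw [PySem.List.enumerate_append, List.foldl_append]
      rw [PySem.List.enumerate_append, List.foldl_append]
      rw [htk]
      have e1 : (0 : Int) + ((rn + 6 : Nat) : Int) = (rn : Int) + 6 := by push_cast; ring
      have e2 : (0 : Int) + ((List.take (rn + 6) l ++ ['{']).length : Int)
          = ((rn : Int) + 6) + 1 := by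
        simp only [List.length_append, htk, List.length_cons, List.length_nil]; push_cast; ring
      rw [e1, e2]
      rw [show PySem.List.enumerate ['{'] ((rn : Int) + 6) = [(((rn : Int) + 6), '{')] from by
        simp [PySem.List.enumerate_cons, PySem.List.enumerate_nil]]
      simp only [List.foldl_cons, List.foldl_nil]
      congr 1
    rw [hfold]
    -- nodup / bounds for the pushed stack
    have hnotmem : ((rn : Int) + 6) ∉ S1.1 := fun h => absurd (hS1lt' _ h) (by omega)
    have hmain := pvFold_main (l.drop (rn + 7)) (((rn : Int) + 6) + 1)
      (((rn : Int) + 6) :: S1.1) S1.2 0 ((rn : Int) + 6)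
      (List.nodup_cons.mpr ⟨hnotmem, hS1nd⟩)
      (by
        intro x hx
        rcases List.mem_cons.mp hx with h | h
        · omega
        · have := hS1lt' x h; omega)
      (by simp)
    have h01 : (((0 : Nat) : Int)) + 1 = 1 := by norm_num
    rw [h01] at hmain
    rw [hrrn, hmain]
    cases hscan : pvScan (l.drop (rn + 7)) 1 with
    | none =>
      simp only [Option.map_none]
      rw [hS1none']
    | some k =>
      simp only [Option.map_some]
      have heq2 : ((rn : Int) + 6) + 1 + (k : Int) = (rn : Int) + 7 + (k : Int) := by ring
      rw [heq2]

-- ===== VERDICT (by name: the statement is the Claim_ definition above) =====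
theorem extract_boxed_answer_spec : Claim_equal_extract_boxed_answer := by
  intro text _
  exact pvMain text
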